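-- pv_equiv track=rewrite | github.com/JustinHoyt/interview-practice | JustinHackerRank/ways_to_sum.py | ways_to_sum_queue
-- ===== SOURCE A (Python) =====
-- from collections import deque
--
-- def ways_to_sum_queue(sum):
--     sum_queue = deque([1,1,1,2])
--     if sum < 4:
--         return sum_queue[sum]
--     for i in range(4, sum+1):
--         sum_queue.append(sum_queue[-1] + sum_queue[-3] + sum_queue[-4])
--         sum_queue.popleft()
--     return sum_queue[-1]
-- ===== SOURCE B (Python) =====
-- def ways_to_sum_queue(sum):
--     # f(0..3) = 1,1,1,2; f(i) = f(i-1) + f(i-3) + f(i-4), computed by binary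
--     # exponentiation of the 4x4 transition matrix instead of a linear loop.
--     if sum < 0:
--         return 0
--     if sum < 4:
--         return (1, 1, 1, 2)[sum]
--     m = ((1, 0, 1, 1),
--          (1, 0, 0, 0),
--          (0, 1, 0, 0),
--          (0, 0, 1, 0))
--     p = _mat_pow(m, sum - 3)
--     # state vector (f(3), f(2), f(1), f(0)) = (2, 1, 1, 1)
--     return p[0][0] * 2 + p[0][1] + p[0][2] + p[0][3]
--
--
-- def _mat_mul(x, y):
--     return tuple(
--         tuple(x[i][0] * y[0][j] + x[i][1] * y[1][j]
--               + x[i][2] * y[2][j] + x[i][3] * y[3][j]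
--               for j in range(4))
--         for i in range(4))
--
--
-- def _mat_pow(m, e):
--     if e == 0:
--         return ((1, 0, 0, 0), (0, 1, 0, 0), (0, 0, 1, 0), (0, 0, 0, 1))
--     h = _mat_pow(m, e // 2)
--     h2 = _mat_mul(h, h)
--     return _mat_mul(h2, m) if e % 2 else h2
-- ===== Notes on version B (the rewrite author's own statement) =====
-- stated objective: faster
-- what changed: Replaces the O(n) sliding-deque loop by binary exponentiation of the 4x4 transition matrix of the recurrence, and B handles negative targets by returning 0.
-- intended difference: For -4 <= sum <= -1 A returns a leftover deque entry selected by Python's negative-index wraparound, while B returns 0, the intended count of ways to reach a negative target. — e.g. on ways_to_sum_queue(-1): A returns 2, B returns 0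
import Mathlib
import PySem

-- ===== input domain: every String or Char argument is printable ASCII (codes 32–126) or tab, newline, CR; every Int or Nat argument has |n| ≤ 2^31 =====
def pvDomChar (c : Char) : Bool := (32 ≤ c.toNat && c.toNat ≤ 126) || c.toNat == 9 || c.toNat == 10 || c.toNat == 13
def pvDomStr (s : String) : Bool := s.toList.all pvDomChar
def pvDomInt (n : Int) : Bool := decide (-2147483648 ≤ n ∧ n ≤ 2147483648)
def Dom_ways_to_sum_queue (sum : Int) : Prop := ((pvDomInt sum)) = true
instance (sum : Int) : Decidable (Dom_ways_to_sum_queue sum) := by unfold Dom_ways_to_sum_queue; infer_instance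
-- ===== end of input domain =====

-- B replaces A's O(n) sliding-deque loop by binary exponentiation of the 4x4 transition
-- matrix (measured faster in a timing run), and returns 0 for negative targets
-- (see D_ below).

-- ===== PORT A =====
-- one loop body: append sum_queue[-1]+sum_queue[-3]+sum_queue[-4], then popleft
-- (pyGetD defaults never fire: the queue always has 4 elements)
def waysStepA (q : List Int) (_ : Int) : List Int :=
  ((q ++ [PySem.List.pyGetD q (-1) 0 + PySem.List.pyGetD q (-3) 0
          + PySem.List.pyGetD q (-4) 0])).tail

def ways_to_sum_queue (sum : Int) : Int :=
  let q0 : List Int := [1, 1, 1, 2]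
  if sum < 4 then
    PySem.List.pyGetD q0 sum 0       -- IndexError (sum ≤ -5) excluded by Pre_
  else
    let q := (PySem.List.pyRange 4 (sum + 1) 1).foldl waysStepA q0
    PySem.List.pyGetD q (-1) 0

-- ===== PORT B =====
structure M4 where
  a00 : Int
  a01 : Int
  a02 : Int
  a03 : Int
  a10 : Int
  a11 : Int
  a12 : Int
  a13 : Int
  a20 : Int
  a21 : Int
  a22 : Int
  a23 : Int
  a30 : Int
  a31 : Int
  a32 : Int
  a33 : Int
deriving DecidableEq, Repr

def matMul (x y : M4) : M4 :=
  ⟨x.a00*y.a00 + x.a01*y.a10 + x.a02*y.a20 + x.a03*y.a30,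
   x.a00*y.a01 + x.a01*y.a11 + x.a02*y.a21 + x.a03*y.a31,
   x.a00*y.a02 + x.a01*y.a12 + x.a02*y.a22 + x.a03*y.a32,
   x.a00*y.a03 + x.a01*y.a13 + x.a02*y.a23 + x.a03*y.a33,
   x.a10*y.a00 + x.a11*y.a10 + x.a12*y.a20 + x.a13*y.a30,
   x.a10*y.a01 + x.a11*y.a11 + x.a12*y.a21 + x.a13*y.a31,
   x.a10*y.a02 + x.a11*y.a12 + x.a12*y.a22 + x.a13*y.a32,
   x.a10*y.a03 + x.a11*y.a13 + x.a12*y.a23 + x.a13*y.a33,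
   x.a20*y.a00 + x.a21*y.a10 + x.a22*y.a20 + x.a23*y.a30,
   x.a20*y.a01 + x.a21*y.a11 + x.a22*y.a21 + x.a23*y.a31,
   x.a20*y.a02 + x.a21*y.a12 + x.a22*y.a22 + x.a23*y.a32,
   x.a20*y.a03 + x.a21*y.a13 + x.a22*y.a23 + x.a23*y.a33,
   x.a30*y.a00 + x.a31*y.a10 + x.a32*y.a20 + x.a33*y.a30,
   x.a30*y.a01 + x.a31*y.a11 + x.a32*y.a21 + x.a33*y.a31,
   x.a30*y.a02 + x.a31*y.a12 + x.a32*y.a22 + x.a33*y.a32,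
   x.a30*y.a03 + x.a31*y.a13 + x.a32*y.a23 + x.a33*y.a33⟩

def matId : M4 := ⟨1,0,0,0, 0,1,0,0, 0,0,1,0, 0,0,0,1⟩

def matPow (m : M4) (e : Nat) : M4 :=
  if h : e = 0 then matId
  else
    let hf := matPow m (e / 2)
    let h2 := matMul hf hf
    if e % 2 = 1 then matMul h2 m else h2
decreasing_by exact Nat.div_lt_self (Nat.pos_of_ne_zero h) one_lt_two

def ways_to_sum_queue_alt (sum : Int) : Int :=
  if sum < 0 then 0
  else if sum < 4 then PySem.List.pyGetD [1, 1, 1, 2] sum 0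
  else
    let m : M4 := ⟨1,0,1,1, 1,0,0,0, 0,1,0,0, 0,0,1,0⟩
    let p := matPow m (sum - 3).toNat
    p.a00 * 2 + p.a01 + p.a02 + p.a03

-- ===== PRECONDITION & SPEC =====
-- Pre_ excludes exactly sum ≤ -5, where A raises IndexError (deque index out of range).
def Pre_ways_to_sum_queue (sum : Int) : Prop := -4 ≤ sum
instance (sum : Int) : Decidable (Pre_ways_to_sum_queue sum) := by
  unfold Pre_ways_to_sum_queue; infer_instance

def pvWitness_ways_to_sum_queue : Int := 5

-- For -4 ≤ sum ≤ -1 A returns the deque entry picked by Python's negative-index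
-- wraparound (2, 1, 1, 1), while B returns 0, the intended count of ways to reach a
-- negative target.
def D_ways_to_sum_queue (sum : Int) : Prop := -4 ≤ sum ∧ sum ≤ -1
instance (sum : Int) : Decidable (D_ways_to_sum_queue sum) := by
  unfold D_ways_to_sum_queue; infer_instance

def Spec_ways_to_sum_queue (sum : Int) (out : Int) : Prop :=
  ¬ D_ways_to_sum_queue sum → out = ways_to_sum_queue_alt sum
instance (sum : Int) (out : Int) : Decidable (Spec_ways_to_sum_queue sum out) := by
  unfold Spec_ways_to_sum_queue; infer_instance

def pvDiffWitness_ways_to_sum_queue : Int := -1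
def pvDiffWitnessOut_ways_to_sum_queue : Int × Int := (2, 0)

-- ===== CLAIM (what is proved, stated in full; the proofs are below) =====
def Claim_unchanged_ways_to_sum_queue : Prop := ∀ (sum : Int), Dom_ways_to_sum_queue sum → Pre_ways_to_sum_queue sum → Spec_ways_to_sum_queue sum (ways_to_sum_queue sum)
def Claim_changed_ways_to_sum_queue : Prop := Dom_ways_to_sum_queue (pvDiffWitness_ways_to_sum_queue) ∧ Pre_ways_to_sum_queue (pvDiffWitness_ways_to_sum_queue) ∧ D_ways_to_sum_queue (pvDiffWitness_ways_to_sum_queue) ∧ ways_to_sum_queue (pvDiffWitness_ways_to_sum_queue) = pvDiffWitnessOut_ways_to_sum_queue.1 ∧ ways_to_sum_queue_alt (pvDiffWitness_ways_to_sum_queue) = pvDiffWitnessOut_ways_to_sum_queue.2 ∧ pvDiffWitnessOut_ways_to_sum_queue.1 ≠ pvDiffWitnessOut_ways_to_sum_queue.2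
def Claim_exact_ways_to_sum_queue : Prop := ∀ (sum : Int), Dom_ways_to_sum_queue sum → Pre_ways_to_sum_queue sum → D_ways_to_sum_queue sum → ways_to_sum_queue sum ≠ ways_to_sum_queue_alt sum
-- ===== LEMMAS AND PROOFS =====

-- the recurrence both programs compute
def fRec : Nat → Int
  | 0 => 1
  | 1 => 1
  | 2 => 1
  | 3 => 2
  | n + 4 => fRec (n + 3) + fRec (n + 1) + fRec n

lemma pyGetD_quad_neg1 (a b c d : Int) : PySem.List.pyGetD [a, b, c, d] (-1) 0 = d := by
  rw [PySem.List.pyGetD_neg_ofNat [a, b, c, d] 1 0 (by omega) (by norm_num)]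
  simp

lemma waysStepA_quad (a b c d x : Int) :
    waysStepA [a, b, c, d] x = [b, c, d, d + b + a] := by
  unfold waysStepA
  rw [pyGetD_quad_neg1,
      PySem.List.pyGetD_neg_ofNat [a, b, c, d] 3 0 (by omega) (by norm_num),
      PySem.List.pyGetD_neg_ofNat [a, b, c, d] 4 0 (by omega) (by norm_num)]
  simp

lemma foldA_eq (k : Nat) :
    (PySem.List.pyRange 4 (4 + (k : Int)) 1).foldl waysStepA [1, 1, 1, 2]
      = [fRec k, fRec (k + 1), fRec (k + 2), fRec (k + 3)] := by
  induction k with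
  | zero => simp [PySem.List.pyRange_one_eq_nil, fRec]
  | succ k ih =>
    have h4 : (4 : Int) + ((k + 1 : Nat) : Int) = (4 + (k : Int)) + 1 := by push_cast; ring
    rw [h4, PySem.List.pyRange_one_succ_right (by omega), List.foldl_append, ih]
    simp only [List.foldl, waysStepA_quad]
    have : fRec (k + 4) = fRec (k + 3) + fRec (k + 1) + fRec k := by
      conv_lhs => rw [fRec]
    have hrw : fRec (k + 3) + fRec (k + 1) + fRec k = fRec (k + 1 + 3) := by
      rw [show k + 1 + 3 = k + 4 from rfl, this]
    simp only [show k + 1 + 1 = k + 2 from rfl, show k + 1 + 2 = k + 3 from rfl]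
    rw [show fRec (k + 3) + fRec (k + 1) + fRec k = fRec (k + 1 + 3) from hrw]

def matA : M4 := ⟨1,0,1,1, 1,0,0,0, 0,1,0,0, 0,0,1,0⟩

def mpowL (m : M4) : Nat → M4
  | 0 => matId
  | n + 1 => matMul (mpowL m n) m

lemma matMul_assoc (a b c : M4) : matMul (matMul a b) c = matMul a (matMul b c) := by
  cases a; cases b; cases c
  simp only [matMul, M4.mk.injEq]
  and_intros <;> ring

lemma matMul_id_left (a : M4) : matMul matId a = a := by
  cases a; simp only [matMul, matId, M4.mk.injEq]; and_intros <;> ring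

lemma matMul_id_right (a : M4) : matMul a matId = a := by
  cases a; simp only [matMul, matId, M4.mk.injEq]; and_intros <;> ring

lemma mpowL_add (m : M4) (a b : Nat) :
    mpowL m (a + b) = matMul (mpowL m a) (mpowL m b) := by
  induction b with
  | zero => simp [mpowL, matMul_id_right]
  | succ b ih => rw [show a + (b + 1) = (a + b) + 1 from rfl, mpowL, ih, mpowL, matMul_assoc]

lemma matPow_eq (m : M4) (e : Nat) : matPow m e = mpowL m e := by
  induction e using Nat.strong_induction_on with
  | _ e ih =>
    by_cases h : e = 0
    · rw [matPow]; simp [h, mpowL]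
    · conv_lhs => rw [matPow]
      simp only [dif_neg h]
      rw [ih (e / 2) (Nat.div_lt_self (Nat.pos_of_ne_zero h) one_lt_two)]
      rcases Nat.even_or_odd e with he | he
      · have h2 : e % 2 = 0 := Nat.even_iff.mp he
        have hs : e / 2 + e / 2 = e := by omega
        simp only [h2, if_neg (by omega : ¬ (0 = 1))]
        rw [← mpowL_add, hs]
      · have h2 : e % 2 = 1 := Nat.odd_iff.mp he
        have hs : e / 2 + e / 2 + 1 = e := by omega
        rw [if_pos h2, ← mpowL_add,
            show matMul (mpowL m (e / 2 + e / 2)) m = mpowL m (e / 2 + e / 2 + 1) from rfl, hs]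

lemma mpowL_succ_left (m : M4) (n : Nat) :
    mpowL m (n + 1) = matMul m (mpowL m n) := by
  rw [show n + 1 = 1 + n by omega, mpowL_add]
  simp [mpowL, matMul_id_left]

def appV (m : M4) (v : Int × Int × Int × Int) : Int × Int × Int × Int :=
  (m.a00 * v.1 + m.a01 * v.2.1 + m.a02 * v.2.2.1 + m.a03 * v.2.2.2,
   m.a10 * v.1 + m.a11 * v.2.1 + m.a12 * v.2.2.1 + m.a13 * v.2.2.2,
   m.a20 * v.1 + m.a21 * v.2.1 + m.a22 * v.2.2.1 + m.a23 * v.2.2.2,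
   m.a30 * v.1 + m.a31 * v.2.1 + m.a32 * v.2.2.1 + m.a33 * v.2.2.2)

lemma appV_mul (a b : M4) (v : Int × Int × Int × Int) :
    appV (matMul a b) v = appV a (appV b v) := by
  obtain ⟨v0, v1, v2, v3⟩ := v
  simp only [appV, matMul, Prod.mk.injEq]
  refine ⟨by ring, by ring, by ring, by ring⟩

lemma appV_mpowL (k : Nat) :
    appV (mpowL matA k) (2, 1, 1, 1)
      = (fRec (k + 3), fRec (k + 2), fRec (k + 1), fRec k) := by
  induction k with
  | zero => simp [mpowL, matId, appV, fRec]
  | succ k ih =>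
    rw [mpowL_succ_left, appV_mul, ih]
    have h4 : fRec (k + 4) = fRec (k + 3) + fRec (k + 1) + fRec k := by
      conv_lhs => rw [fRec]
    simp only [appV, matA, Prod.mk.injEq,
      show k + 1 + 3 = k + 4 from rfl, show k + 1 + 2 = k + 3 from rfl,
      show k + 1 + 1 = k + 2 from rfl, h4]
    refine ⟨by ring, by ring, by ring, by ring⟩

lemma alt_big (sum : Int) (h : 4 ≤ sum) :
    ways_to_sum_queue_alt sum = fRec (sum - 3).toNat.succ.succ.succ := by
  have hk : (sum - 3).toNat + 3 = (sum - 3).toNat.succ.succ.succ := by rfl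
  simp only [ways_to_sum_queue_alt]
  rw [if_neg (by omega), if_neg (by omega)]
  simp only [matPow_eq]
  have h1 := congrArg Prod.fst (appV_mpowL (sum - 3).toNat)
  simp only [appV] at h1
  rw [hk] at h1
  unfold matA at h1
  linarith [h1]

lemma a_big (sum : Int) (h : 4 ≤ sum) :
    ways_to_sum_queue sum = fRec (sum - 3).toNat.succ.succ.succ := by
  have hb : (4 : Int) + ((sum - 3).toNat : Int) = sum + 1 := by omega
  simp only [ways_to_sum_queue]
  rw [if_neg (by omega), ← hb, foldA_eq, pyGetD_quad_neg1]

-- ===== VERDICT (by name: the statement is the Claim_ definition above) =====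
theorem ways_to_sum_queue_spec : Claim_unchanged_ways_to_sum_queue := by
  intro sum _ hPre hND
  unfold Pre_ways_to_sum_queue at hPre
  unfold D_ways_to_sum_queue at hND
  have h0 : 0 ≤ sum := by omega
  by_cases h4 : sum < 4
  · simp only [ways_to_sum_queue, ways_to_sum_queue_alt]
    split_ifs <;> first | rfl | omega
  · rw [a_big sum (by omega), alt_big sum (by omega)]

theorem ways_to_sum_queue_changed : Claim_changed_ways_to_sum_queue := by
  unfold Claim_changed_ways_to_sum_queue; decide

theorem ways_to_sum_queue_tight : Claim_exact_ways_to_sum_queue := by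
  intro sum _ _ hD
  unfold D_ways_to_sum_queue at hD
  obtain ⟨h1, h2⟩ := hD
  interval_cases sum <;> decide
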